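-- pv_equiv track=rewrite | github.com/kopchik/itasks | homyak/first_non_repetitive_char.py | findNonRepChar
-- ===== SOURCE A (Python) =====
-- def findNonRepChar(s):
--   counts = {}
--   positions = {}
--   for pos, c in enumerate(s):
--     if c not in counts:
--       counts[c] = 1
--       positions[c] = pos
--     else:
--       counts[c] = counts[c] + 1
--
--   for c,pos in sorted(positions.items()):
--     if counts[c] > 1:
--       continue
--     return c
--   return None
-- ===== SOURCE B (Python) =====
-- def findNonRepChar(s):
--   counts = {}
--   for c in s:
--     counts[c] = counts.get(c, 0) + 1
--   best = None
--   for c, n in counts.items():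
--     if n == 1 and (best is None or c < best):
--       best = c
--   return best
-- ===== Notes on version B (the rewrite author's own statement) =====
-- stated objective: simpler
-- what changed: Drops the positions dict and the sort: one counting pass, then a single linear min-scan over the counts picks the alphabetically smallest count-1 character.
import Mathlib
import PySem

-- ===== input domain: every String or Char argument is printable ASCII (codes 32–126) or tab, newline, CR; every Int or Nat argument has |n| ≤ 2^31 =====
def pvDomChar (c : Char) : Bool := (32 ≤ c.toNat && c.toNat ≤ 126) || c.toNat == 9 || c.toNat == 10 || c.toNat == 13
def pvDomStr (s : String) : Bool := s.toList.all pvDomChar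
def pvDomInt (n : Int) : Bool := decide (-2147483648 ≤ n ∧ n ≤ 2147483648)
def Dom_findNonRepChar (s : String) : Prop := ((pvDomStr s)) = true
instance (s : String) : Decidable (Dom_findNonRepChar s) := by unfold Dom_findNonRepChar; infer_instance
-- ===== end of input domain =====

-- B drops A's positions dict and its sort: one counting pass, then a single linear
-- min-scan over the counts picks the alphabetically smallest count-1 character (objective: simpler).


-- ===== PORT A =====
-- A's second loop: 'for c,pos in sorted(positions.items()): if counts[c] > 1: continue; return c' / 'return None'
-- (counts[c]: the key is always present there, so getD is exact)
def findNonRepCharGo (counts : PySem.Dict Char Int) : List (Char × Int) → Option String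
  | [] => none
  | (c, _) :: rest =>
      if counts.getD c 0 > 1 then findNonRepCharGo counts rest else some (String.ofList [c])

def findNonRepChar (s : String) : Option String :=
  let st := (PySem.List.enumerate s.toList 0).foldl
    (fun (cp : PySem.Dict Char Int × PySem.Dict Char Int) pc =>
      if cp.1.contains pc.2 = false then
        (cp.1.insert pc.2 1, cp.2.insert pc.2 pc.1)
      else
        (cp.1.insert pc.2 (cp.1.getD pc.2 0 + 1), cp.2))
    (PySem.Dict.empty, PySem.Dict.empty)
  findNonRepCharGo st.1 (PySem.List.sorted2 st.2.items (·.1) (·.2))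

-- ===== PORT B =====
def findNonRepChar_alt (s : String) : Option String :=
  let counts : PySem.Dict Char Int := s.toList.foldl
    (fun d c => d.insert c (d.getD c 0 + 1)) PySem.Dict.empty
  let best := counts.items.foldl
    (fun (best : Option Char) (p : Char × Int) =>
      if p.2 = 1 then
        match best with
        | none => some p.1
        | some m => if p.1 < m then some p.1 else best
      else best) none
  best.map (fun c => String.ofList [c])

-- ===== PRECONDITION & SPEC =====
def Spec_findNonRepChar (s : String) (out : Option String) : Prop := out = findNonRepChar_alt s
instance (s : String) (out : Option String) : Decidable (Spec_findNonRepChar s out) := by unfold Spec_findNonRepChar; infer_instance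

-- ===== CLAIM (what is proved, stated in full; the proofs are below) =====
def Claim_equal_findNonRepChar : Prop := ∀ (s : String), Dom_findNonRepChar s → Spec_findNonRepChar s (findNonRepChar s)

-- ===== LEMMAS AND PROOFS =====

-- A's first loop: its counts component equals B's counting fold (positions ignored).
theorem pvFoldFst (l : List Char) (i : Int) (d p : PySem.Dict Char Int) :
    ((PySem.List.enumerate l i).foldl
      (fun (cp : PySem.Dict Char Int × PySem.Dict Char Int) pc =>
        if cp.1.contains pc.2 = false then
          (cp.1.insert pc.2 1, cp.2.insert pc.2 pc.1)
        else
          (cp.1.insert pc.2 (cp.1.getD pc.2 0 + 1), cp.2)) (d, p)).1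
    = l.foldl (fun d c => d.insert c (d.getD c 0 + 1)) d := by
  induction l generalizing i d p with
  | nil => rfl
  | cons c t ih =>
    rw [PySem.List.enumerate_cons]
    simp only [List.foldl_cons]
    by_cases hc : d.contains c = false
    · rw [if_pos hc, ih, PySem.Dict.getD_of_not_contains d 0 hc]
      simp
    · rw [if_neg hc, ih]

-- A's first loop: the positions keys are the distinct characters in first-occurrence order.
theorem pvFoldSndKeys (l : List Char) (i : Int) (d p : PySem.Dict Char Int)
    (h : d.keys = p.keys) :
    ((PySem.List.enumerate l i).foldl
      (fun (cp : PySem.Dict Char Int × PySem.Dict Char Int) pc =>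
        if cp.1.contains pc.2 = false then
          (cp.1.insert pc.2 1, cp.2.insert pc.2 pc.1)
        else
          (cp.1.insert pc.2 (cp.1.getD pc.2 0 + 1), cp.2)) (d, p)).2.keys
    = PySem.Set.update p.keys l := by
  induction l generalizing i d p with
  | nil => simp [PySem.List.enumerate, PySem.Set.update]
  | cons c t ih =>
    rw [PySem.List.enumerate_cons]
    simp only [List.foldl_cons]
    have hc' : p.contains c = d.contains c := by
      rw [PySem.Dict.contains_eq_decide_mem_keys, PySem.Dict.contains_eq_decide_mem_keys, h]
    have hupd : PySem.Set.update p.keys (c :: t) = PySem.Set.update (PySem.Set.add p.keys c) t := rfl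
    by_cases hc : d.contains c = false
    · rw [if_pos hc]
      have hpc : p.contains c = false := hc' ▸ hc
      have hmem : c ∉ p.keys := by
        intro hm
        rw [PySem.Dict.contains_eq_decide_mem_keys] at hpc
        simp [hm] at hpc
      have hadd : PySem.Set.add p.keys c = p.keys ++ [c] := PySem.Set.add_of_not_mem hmem
      rw [ih _ _ _ (by
        rw [PySem.Dict.keys_insert_of_not_contains _ _ hc,
            PySem.Dict.keys_insert_of_not_contains _ _ hpc, h]),
        PySem.Dict.keys_insert_of_not_contains _ _ hpc, hupd, hadd]
    · rw [if_neg hc]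
      have hpc : p.contains c = true := by simpa using hc' ▸ (by simpa using hc : d.contains c = true)
      have hmem : c ∈ p.keys := by
        rw [PySem.Dict.contains_eq_decide_mem_keys] at hpc
        simpa using hpc
      have hadd : PySem.Set.add p.keys c = p.keys := PySem.Set.add_of_mem hmem
      rw [ih _ _ _ (by rw [PySem.Dict.keys_insert_of_contains _ _ (by simpa using hc), h]),
        hupd, hadd]

-- insertBy only compares the inserted element with list members.
theorem pvInsertByCongr {α : Type} (b1 b2 : α → α → Bool) (x : α) (ys : List α)
    (h : ∀ y ∈ ys, b1 x y = b2 x y) :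
    PySem.List.insertBy b1 x ys = PySem.List.insertBy b2 x ys := by
  induction ys with
  | nil => rfl
  | cons y t ih =>
    show (if b1 x y = true then x :: y :: t else y :: PySem.List.insertBy b1 x t)
       = (if b2 x y = true then x :: y :: t else y :: PySem.List.insertBy b2 x t)
    rw [h y (by simp), ih (fun z hz => h z (by simp [hz]))]

-- with pairwise-distinct first components, lexicographic insertion = insertion by the key alone.
theorem pvSorted2Aux (l : List (Char × Int)) (acc : List (Char × Int))
    (hl : l.Pairwise (fun a b => a.1 ≠ b.1))
    (hacc : ∀ x ∈ l, ∀ y ∈ acc, x.1 ≠ y.1) :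
    l.foldl (fun acc x => PySem.List.insertBy
        (fun a b => decide (a.1 < b.1) || (!decide (b.1 < a.1) && decide (a.2 < b.2))) x acc) acc
    = l.foldl (fun acc x => PySem.List.insertBy (fun a b => decide (a.1 < b.1)) x acc) acc := by
  induction l generalizing acc with
  | nil => rfl
  | cons x t ih =>
    simp only [List.foldl_cons]
    have hstep : PySem.List.insertBy
        (fun a b => decide (a.1 < b.1) || (!decide (b.1 < a.1) && decide (a.2 < b.2))) x acc
        = PySem.List.insertBy (fun a b => decide (a.1 < b.1)) x acc := by
      apply pvInsertByCongr
      intro y hy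
      have hne := hacc x (by simp) y hy
      rcases lt_trichotomy x.1 y.1 with hlt | heq | hgt
      · simp [hlt]
      · exact absurd heq hne
      · simp [hgt, not_lt.mpr (le_of_lt hgt)]
    rw [hstep]
    refine ih _ (List.pairwise_cons.1 hl).2 ?_
    intro z hz y hy
    rcases (PySem.List.insertBy_mem_iff _ _ _ _).1 hy with rfl | hy'
    · exact ((List.pairwise_cons.1 hl).1 z hz).symm
    · exact hacc z (by simp [hz]) y hy'

-- on pairwise-distinct first components, the lexicographic sort is the sort by key.
theorem pvSorted2EqSorted (xs : List (Char × Int))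
    (h : (xs.map Prod.fst).Nodup) :
    PySem.List.sorted2 xs (·.1) (·.2) = PySem.List.sorted xs (·.1) := by
  rw [PySem.List.sorted_eq_foldl_insertBy]
  show List.foldl _ [] xs = _
  have hp : xs.Pairwise (fun a b => a.1 ≠ b.1) := by
    rw [List.Nodup, List.pairwise_map] at h
    exact h
  exact pvSorted2Aux xs [] hp (by simp)

theorem pvFoldMinConst (c : Char) (rest : List Char) (h : ∀ y ∈ rest, c < y) :
    rest.foldl min c = c := by
  rcases PySem.List.foldl_min_mem rest c with h1 | h1
  · exact h1
  · exact absurd ((PySem.List.foldl_min_le rest c).1) (not_le.mpr (h _ h1))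

-- first qualifying element of a strictly key-increasing list = minimum qualifying key.
theorem pvGoEqMin (counts : PySem.Dict Char Int) (S : List (Char × Int))
    (hs : S.Pairwise (fun a b => a.1 < b.1)) :
    findNonRepCharGo counts S
      = (PySem.List.min? ((S.map Prod.fst).filter
          (fun c => !decide (counts.getD c 0 > 1))) (fun x => x)).map
          (fun c => String.ofList [c]) := by
  induction S with
  | nil => rfl
  | cons p t ih =>
    obtain ⟨c, pos⟩ := p
    rw [List.pairwise_cons] at hs
    by_cases hgt : counts.getD c 0 > 1
    · show (if counts.getD c 0 > 1 then _ else _) = _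
      rw [if_pos hgt]
      rw [ih hs.2]
      congr 1
      simp [hgt]
    · show (if counts.getD c 0 > 1 then _ else _) = _
      rw [if_neg hgt]
      have hfilt : ((((c, pos) :: t).map Prod.fst).filter
          (fun c => !decide (counts.getD c 0 > 1)))
          = c :: ((t.map Prod.fst).filter (fun c => !decide (counts.getD c 0 > 1))) := by
        simp [hgt]
      rw [hfilt, PySem.List.min?_id_cons]
      rw [pvFoldMinConst c _ (by
        intro y hy
        rcases List.mem_filter.1 hy with ⟨hy1, _⟩
        rcases List.mem_map.1 hy1 with ⟨q, hq, rfl⟩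
        exact hs.1 q hq)]
      rfl

-- min over the identity key is permutation-invariant (the minimum value is unique).
theorem pvMinPerm (l l' : List Char) (h : l.Perm l') :
    PySem.List.min? l (fun x => x) = PySem.List.min? l' (fun x => x) := by
  cases hm : PySem.List.min? l (fun x => x) with
  | none =>
    rw [PySem.List.min?_eq_none_iff] at hm
    subst hm
    rw [List.nil_perm.1 h]
    rfl
  | some m =>
    cases hm' : PySem.List.min? l' (fun x => x) with
    | none =>
      rw [PySem.List.min?_eq_none_iff] at hm'
      subst hm'
      rw [List.nil_perm.1 h.symm] at hm
      simp [PySem.List.min?] at hm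
    | some m' =>
      have h1 : m ≤ m' := PySem.List.min?_isMin hm _ (h.symm.mem_iff.1 (PySem.List.min?_mem hm'))
      have h2 : m' ≤ m := PySem.List.min?_isMin hm' _ (h.mem_iff.1 (PySem.List.min?_mem hm))
      rw [le_antisymm h1 h2]

-- B's reduced fold over qualifying characters is min?
theorem pvAltFoldEqMin (l : List Char) :
    l.foldl (fun (best : Option Char) k =>
        match best with
        | none => some k
        | some m => if k < m then some k else best) none
      = PySem.List.min? l (fun x => x) := by
  rw [PySem.List.min?]
  apply PySem.List.foldl_congr_mem
  intro acc x _
  cases acc <;> rfl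

-- B computes the minimum of the count-1 characters.
theorem pvAltEq (s : String) :
    findNonRepChar_alt s
      = (PySem.List.min? ((PySem.Set.ofList s.toList).filter
          (fun k => decide ((s.toList.count k : Int) = 1))) (fun x => x)).map
          (fun c => String.ofList [c]) := by
  show (((s.toList.foldl (fun (d : PySem.Dict Char Int) c => d.insert c (d.getD c 0 + 1)) PySem.Dict.empty).items.foldl
      (fun (best : Option Char) (p : Char × Int) =>
        if p.2 = 1 then
          match best with
          | none => some p.1
          | some m => if p.1 < m then some p.1 else best
        else best) none).map (fun c => String.ofList [c])) = _
  rw [PySem.Dict.foldl_insert_getD_add_one_eq_counter, PySem.Dict.items_counter,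
    List.foldl_map]
  rw [PySem.List.foldl_ite_eq_foldl_filter
    (p := fun k => ((s.toList.count k : Int) = 1))
    (f := fun (best : Option Char) k =>
        match best with
        | none => some k
        | some m => if k < m then some k else best)]
  rw [pvAltFoldEqMin]

-- A computes the same minimum.
theorem pvAEq (s : String) :
    findNonRepChar s = findNonRepChar_alt s := by
  show findNonRepCharGo _ _ = _
  have hst1 := pvFoldFst s.toList 0 PySem.Dict.empty PySem.Dict.empty
  have hkeys := pvFoldSndKeys s.toList 0 PySem.Dict.empty PySem.Dict.empty rfl
  set st := (PySem.List.enumerate s.toList 0).foldl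
    (fun (cp : PySem.Dict Char Int × PySem.Dict Char Int) pc =>
      if cp.1.contains pc.2 = false then
        (cp.1.insert pc.2 1, cp.2.insert pc.2 pc.1)
      else
        (cp.1.insert pc.2 (cp.1.getD pc.2 0 + 1), cp.2))
    (PySem.Dict.empty, PySem.Dict.empty) with hstdef
  have hkeys' : st.2.keys = PySem.Set.ofList s.toList := by
    rw [hkeys, PySem.Dict.keys_empty, PySem.Set.ofList_eq_foldl]
    rfl
  have hnd : (st.2.items.map Prod.fst).Nodup := by
    have : st.2.items.map Prod.fst = st.2.keys := rfl
    rw [this, hkeys']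
    exact PySem.Set.nodup_ofList _
  rw [pvSorted2EqSorted _ hnd]
  have hndS : ((PySem.List.sorted st.2.items (·.1)).map Prod.fst).Nodup :=
    ((PySem.List.sorted_perm st.2.items (·.1) false).map Prod.fst).nodup_iff.mpr hnd
  have hpw : (PySem.List.sorted st.2.items (·.1)).Pairwise (fun a b => a.1 < b.1) := by
    have h1 := PySem.List.sorted_pairwise st.2.items (fun p : Char × Int => p.1)
    have h2 : (PySem.List.sorted st.2.items (·.1)).Pairwise (fun a b => a.1 ≠ b.1) := by
      have := hndS
      rw [List.Nodup, List.pairwise_map] at this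
      exact this
    exact (h1.and h2).imp (fun h => lt_of_le_of_ne h.1 h.2)
  rw [pvGoEqMin _ _ hpw, hst1, PySem.Dict.foldl_insert_getD_add_one_eq_counter]
  have hperm : ((PySem.List.sorted st.2.items (·.1)).map Prod.fst).Perm (PySem.Set.ofList s.toList) := by
    rw [← hkeys']
    exact (PySem.List.sorted_perm st.2.items (·.1) false).map Prod.fst
  rw [pvMinPerm _ _ (hperm.filter _)]
  have hfc : ∀ c ∈ PySem.Set.ofList s.toList,
      (!decide ((PySem.Dict.counter s.toList).getD c 0 > 1))
        = decide ((s.toList.count c : Int) = 1) := by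
    intro c hc
    have hmem : c ∈ s.toList := (PySem.Set.mem_ofList _ _).1 hc
    have hpos : 1 ≤ s.toList.count c := List.count_pos_iff.mpr hmem
    rw [PySem.Dict.getD_counter, ← decide_not, decide_eq_decide]
    constructor
    · intro h
      push_cast at h ⊢
      omega
    · intro h
      push_cast at h ⊢
      omega
  rw [List.filter_congr hfc, ← pvAltEq s]

-- ===== VERDICT (by name: the statement is the Claim_ definition above) =====
theorem findNonRepChar_spec : Claim_equal_findNonRepChar := by
  intro s _
  unfold Spec_findNonRepChar
  exact pvAEq s
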